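-- pv_equiv track=rewrite | github.com/lawrencehsiang/second | analyze_scrd_results.py | extract_round_usage_summary
-- ===== SOURCE A (Python) =====
-- from collections import Counter, defaultdict
-- from typing import Any
--
-- def extract_round_usage_summary(usage_records: list[dict[str, Any]]) -> dict[int, int]:
--     round_totals: dict[int, int] = defaultdict(int)
--     for rec in usage_records:
--         round_id = rec.get("round_id")
--         total = int(rec.get("total_tokens", 0))
--         if round_id is not None:
--             round_totals[int(round_id)] += total
--     return dict(sorted(round_totals.items(), key=lambda kv: kv[0]))
-- ===== SOURCE B (Python) =====
-- from itertools import groupby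
--
--
-- def extract_round_usage_summary(usage_records):
--     pairs = [(rec.get("round_id"), int(rec.get("total_tokens", 0)))
--              for rec in usage_records]
--     keyed = sorted(((int(r), t) for r, t in pairs if r is not None),
--                    key=lambda p: p[0])
--     return {k: sum(t for _, t in g)
--             for k, g in groupby(keyed, key=lambda p: p[0])}
-- ===== Notes on version B (the rewrite author's own statement) =====
-- stated objective: alternative
-- what changed: Replaces A's defaultdict-accumulate-then-sort-items strategy by mapping every record to an (Option round_id, total) pair, filtering and sorting the pairs by round_id, then one itertools.groupby pass summing each group into the already-sorted result dict.
import Mathlib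
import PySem

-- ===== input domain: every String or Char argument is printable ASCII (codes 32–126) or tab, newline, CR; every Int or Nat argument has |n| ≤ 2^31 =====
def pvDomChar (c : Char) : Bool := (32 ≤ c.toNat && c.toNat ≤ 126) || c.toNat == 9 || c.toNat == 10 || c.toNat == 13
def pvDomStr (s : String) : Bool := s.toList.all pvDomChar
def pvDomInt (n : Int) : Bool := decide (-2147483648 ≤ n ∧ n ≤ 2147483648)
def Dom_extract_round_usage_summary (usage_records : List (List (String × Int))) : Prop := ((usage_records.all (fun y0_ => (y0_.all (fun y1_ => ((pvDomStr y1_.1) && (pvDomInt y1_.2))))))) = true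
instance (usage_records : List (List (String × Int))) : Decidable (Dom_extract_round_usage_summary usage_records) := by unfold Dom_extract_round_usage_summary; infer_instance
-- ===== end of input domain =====

-- B replaces A's defaultdict-accumulate-then-sort strategy with a map/filter, sort-by-round,
-- single groupby-summing pass (alternative decomposition, same result).

-- ===== PORT A =====
def extract_round_usage_summary (usage_records : List (List (String × Int))) : List (Int × Int) :=
  let round_totals : PySem.Dict Int Int :=
    usage_records.foldl (fun d rec =>
      let round_id := (PySem.Dict.mk rec).get? "round_id"
      let total := (PySem.Dict.mk rec).getD "total_tokens" 0   -- int() is the identity on int values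
      match round_id with
      | some r => d.modify r 0 (· + total)                     -- round_totals[int(round_id)] += total
      | none => d) PySem.Dict.empty
  (PySem.Dict.ofList (PySem.List.sorted round_totals.items (fun kv => kv.1) false)).items

-- ===== PORT B =====
-- itertools.groupby(keyed, key=p[0]) consumed by summing each group's second components
def pvGroupSums : List (Int × Int) → List (Int × Int)
  | [] => []
  | p :: rest =>
    let grp := p :: rest.takeWhile (fun q => q.1 == p.1)
    (p.1, (grp.map (·.2)).sum) :: pvGroupSums (rest.dropWhile (fun q => q.1 == p.1))
  termination_by l => l.length
  decreasing_by
    have := List.length_dropWhile_le (fun q => q.1 == p.1) rest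
    simp only [List.length_cons]; omega

def extract_round_usage_summary_alt (usage_records : List (List (String × Int))) : List (Int × Int) :=
  let pairs := usage_records.map (fun rec =>
    ((PySem.Dict.mk rec).get? "round_id", (PySem.Dict.mk rec).getD "total_tokens" 0))
  let keyed := PySem.List.sorted (pairs.filterMap (fun p => p.1.map (fun r => (r, p.2))))
                 (fun kv => kv.1) false
  pvGroupSums keyed

-- ===== PRECONDITION & SPEC =====
def Spec_extract_round_usage_summary (usage_records : List (List (String × Int))) (out : List (Int × Int)) : Prop := out = extract_round_usage_summary_alt usage_records
instance (usage_records : List (List (String × Int))) (out : List (Int × Int)) : Decidable (Spec_extract_round_usage_summary usage_records out) := by unfold Spec_extract_round_usage_summary; infer_instance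

-- ===== CLAIM (what is proved, stated in full; the proofs are below) =====
def Claim_equal_extract_round_usage_summary : Prop := ∀ (usage_records : List (List (String × Int))), Dom_extract_round_usage_summary usage_records → Spec_extract_round_usage_summary usage_records (extract_round_usage_summary usage_records)

-- ===== LEMMAS AND PROOFS =====

-- the (round_id, total) pairs actually accumulated, in record order
def pvPairs (usage_records : List (List (String × Int))) : List (Int × Int) :=
  usage_records.filterMap (fun rec =>
    ((PySem.Dict.mk rec).get? "round_id").map (fun r => (r, (PySem.Dict.mk rec).getD "total_tokens" 0)))

-- total tokens attributed to key k by a pair list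
def pvSum (k : Int) (l : List (Int × Int)) : Int :=
  ((l.filter (fun p => p.1 == k)).map (·.2)).sum

lemma pvSum_cons (k : Int) (p : Int × Int) (l : List (Int × Int)) :
    pvSum k (p :: l) = if p.1 = k then p.2 + pvSum k l else pvSum k l := by
  by_cases h : p.1 = k <;> simp [pvSum, h]

lemma pvSum_perm {l l' : List (Int × Int)} (h : l.Perm l') (k : Int) : pvSum k l = pvSum k l' :=
  ((h.filter _).map _).sum_eq

lemma pvSum_filter_ne (k k' : Int) (l : List (Int × Int)) (h : k ≠ k') :
    pvSum k (l.filter (fun q => !(q.1 == k'))) = pvSum k l := by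
  induction l with
  | nil => rfl
  | cons p t ih =>
    by_cases hp : p.1 = k'
    · simp [hp, pvSum_cons, ih]
      exact fun hh => absurd hh.symm h
    · by_cases hk : p.1 = k <;> simp [pvSum_cons, hp, hk, ih, h]

-- A's accumulation loop is the pair-list fold
lemma pvFoldA (usage_records : List (List (String × Int))) (d : PySem.Dict Int Int) :
    usage_records.foldl (fun d rec =>
      let round_id := (PySem.Dict.mk rec).get? "round_id"
      let total := (PySem.Dict.mk rec).getD "total_tokens" 0
      match round_id with
      | some r => d.modify r 0 (· + total)
      | none => d) d
    = (pvPairs usage_records).foldl (fun d p => d.modify p.1 0 (· + p.2)) d := by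
  induction usage_records generalizing d with
  | nil => rfl
  | cons rec t ih =>
    cases h : (PySem.Dict.mk rec).get? "round_id" <;> simp [pvPairs, h, ih]

lemma pvGetD_fold (l : List (Int × Int)) (d : PySem.Dict Int Int) (k : Int) :
    (l.foldl (fun d p => d.modify p.1 0 (· + p.2)) d).getD k 0 = d.getD k 0 + pvSum k l := by
  induction l generalizing d with
  | nil => simp [pvSum]
  | cons p t ih =>
    rw [List.foldl_cons, ih, PySem.Dict.getD_modify, pvSum_cons]
    by_cases h : p.1 = k
    · rw [if_pos h.symm, if_pos h, h]; ring
    · rw [if_neg (fun hh => h hh.symm), if_neg h]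

-- two lists strictly sorted on the first component with the same members are equal
lemma pvUniq : ∀ (l₁ l₂ : List (Int × Int)), l₁.Perm l₂ →
    l₁.Pairwise (fun a b => a.1 < b.1) → l₂.Pairwise (fun a b => a.1 < b.1) → l₁ = l₂ := by
  intro l₁
  induction l₁ with
  | nil => intro l₂ h _ _; simpa using h.nil_eq
  | cons a t₁ ih =>
    intro l₂ hp h1 h2
    cases l₂ with
    | nil => exact absurd hp.symm (by simp)
    | cons b t₂ =>
      have hab : a = b := by
        by_contra hne
        have ha : a ∈ b :: t₂ := hp.mem_iff.mp (by simp)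
        have hb : b ∈ a :: t₁ := hp.symm.mem_iff.mp (by simp)
        have ha' : a ∈ t₂ := by cases ha with | head => exact absurd rfl hne | tail _ h => exact h
        have hb' : b ∈ t₁ := by
          cases hb with | head => exact absurd rfl (fun h => hne h.symm) | tail _ h => exact h
        have h1' := (List.pairwise_cons.mp h1).1 b hb'
        have h2' := (List.pairwise_cons.mp h2).1 a ha'
        omega
      subst hab
      have := ih t₂ (hp.cons_inv) (List.pairwise_cons.mp h1).2 (List.pairwise_cons.mp h2).2
      rw [this]

-- strict key order from weak order plus key nodup
lemma pvStrict (l : List (Int × Int)) (hle : l.Pairwise (fun a b => a.1 ≤ b.1))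
    (hnd : (l.map (·.1)).Nodup) : l.Pairwise (fun a b => a.1 < b.1) := by
  have hne : l.Pairwise (fun a b : Int × Int => a.1 ≠ b.1) :=
    (List.pairwise_map.mp hnd)
  exact (hle.and hne).imp (fun h => lt_of_le_of_ne h.1 h.2)

lemma pvNodup_of_strict (l : List (Int × Int)) (h : l.Pairwise (fun a b => a.1 < b.1)) :
    l.Nodup :=
  h.imp (fun hab => by intro he; rw [he] at hab; omega)

-- in a key-≤-sorted list, the group at the head's key is its filter, the remainder its co-filter
lemma pvTakeDrop (k : Int) : ∀ (l : List (Int × Int)), (∀ q ∈ l, k ≤ q.1) →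
    l.Pairwise (fun a b => a.1 ≤ b.1) →
    l.takeWhile (fun q => q.1 == k) = l.filter (fun q => q.1 == k) ∧
    l.dropWhile (fun q => q.1 == k) = l.filter (fun q => !(q.1 == k)) := by
  intro l
  induction l with
  | nil => simp
  | cons p t ih =>
    intro hge hpw
    have hpw' := List.pairwise_cons.mp hpw
    by_cases hp : p.1 = k
    · have := ih (fun q hq => hge q (by simp [hq])) hpw'.2
      simp [hp, this.1, this.2]
    · have hk : k < p.1 := lt_of_le_of_ne (hge p (by simp)) (fun h => hp h.symm)
      have hnone : ∀ q ∈ t, ¬ (q.1 = k) := by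
        intro q hq
        have := hpw'.1 q hq
        omega
      constructor
      · rw [List.takeWhile_cons_of_neg (by simp [hp]), List.filter_cons_of_neg (by simp [hp]),
            List.filter_eq_nil_iff.mpr (fun q hq => by simp [hnone q hq])]
      · rw [List.dropWhile_cons_of_neg (by simp [hp]), List.filter_cons_of_pos (by simp [hp]),
            List.filter_eq_self.mpr (fun q hq => by simp [hnone q hq])]

-- characterization of the groupby pass on a key-≤-sorted list
lemma pvGroupSums_char : ∀ (M : List (Int × Int)), M.Pairwise (fun a b => a.1 ≤ b.1) →
    (pvGroupSums M).Pairwise (fun a b => a.1 < b.1) ∧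
    (∀ k v, (k, v) ∈ pvGroupSums M ↔ (k ∈ M.map (·.1) ∧ v = pvSum k M)) := by
  intro M
  induction M using pvGroupSums.induct with
  | case1 => simp [pvGroupSums, pvSum]
  | case2 p rest ih =>
    intro hpw
    have hpw' := List.pairwise_cons.mp hpw
    have td := pvTakeDrop p.1 rest hpw'.1 hpw'.2
    have hM' : rest.dropWhile (fun q => q.1 == p.1) = rest.filter (fun q => !(q.1 == p.1)) := td.2
    have ih' := ih (hM' ▸ hpw'.2.filter _)
    rw [hM'] at ih'
    have hhead : p.2 + ((rest.takeWhile (fun q => q.1 == p.1)).map (·.2)).sum = pvSum p.1 (p :: rest) := by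
      rw [td.1, pvSum_cons, if_pos rfl]; rfl
    have hunf : pvGroupSums (p :: rest)
        = (p.1, pvSum p.1 (p :: rest)) :: pvGroupSums (rest.dropWhile (fun q => q.1 == p.1)) := by
      rw [pvGroupSums]
      simp only [List.map_cons, List.sum_cons, hhead]
    rw [hM'] at hunf
    have hmemM' : ∀ k : Int, k ∈ (rest.filter (fun q => !(q.1 == p.1))).map (·.1) ↔
        (k ∈ rest.map (·.1) ∧ k ≠ p.1) := by
      intro k
      simp only [List.mem_map, List.mem_filter]
      constructor
      · rintro ⟨q, ⟨hq, hne⟩, rfl⟩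
        exact ⟨⟨q, hq, rfl⟩, by simpa using hne⟩
      · rintro ⟨⟨q, hq, rfl⟩, hne⟩
        exact ⟨q, ⟨hq, by simpa using hne⟩, rfl⟩
    constructor
    · rw [hunf]
      refine List.pairwise_cons.mpr ⟨?_, ih'.1⟩
      intro b hb
      have hbc := (ih'.2 b.1 b.2).mp (by simpa using hb)
      have hk := (hmemM' b.1).mp hbc.1
      have hle : p.1 ≤ b.1 := by
        obtain ⟨q, hq, he⟩ := List.mem_map.mp hk.1
        rw [← he]
        exact hpw'.1 q hq
      exact lt_of_le_of_ne hle (fun h => hk.2 h.symm)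
    · intro k v
      rw [hunf]
      simp only [List.mem_cons, Prod.mk.injEq]
      rw [ih'.2 k v, hmemM' k]
      by_cases hk : k = p.1
      · subst hk
        simp
      · have h1 : pvSum k (rest.filter (fun q => !(q.1 == p.1))) = pvSum k rest :=
          pvSum_filter_ne k p.1 rest hk
        have h2 : pvSum k (p :: rest) = pvSum k rest := by
          rw [pvSum_cons, if_neg (fun h => hk h.symm)]
        simp [hk, h1, h2]

-- A's dict items characterization
lemma pvItemsA (l : List (Int × Int)) :
    (l.foldl (fun d p => d.modify p.1 0 (· + p.2)) PySem.Dict.empty).items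
      = (PySem.Set.ofList (l.map (·.1))).map (fun k => (k, pvSum k l)) := by
  have hnd : (l.foldl (fun d p => d.modify p.1 0 (· + p.2)) PySem.Dict.empty).keys.Nodup :=
    PySem.Dict.nodup_keys_foldl_modify_key l (·.1) 0 (fun _ p => (· + p.2)) _ (by simp)
  have hkeys : (l.foldl (fun d p => d.modify p.1 0 (· + p.2)) PySem.Dict.empty).keys
      = PySem.Set.ofList (l.map (·.1)) := by
    rw [PySem.Dict.keys_foldl_modify_key]
    simp [PySem.Set.update_nil_left]
  rw [PySem.Dict.items_eq_map_keys _ hnd 0, hkeys]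
  exact List.map_congr_left (fun k _ => by rw [pvGetD_fold]; simp)

-- ===== VERDICT (by name: the statement is the Claim_ definition above) =====
theorem extract_round_usage_summary_spec : Claim_equal_extract_round_usage_summary := by
  intro rs _
  unfold Spec_extract_round_usage_summary extract_round_usage_summary extract_round_usage_summary_alt
  simp only []
  rw [pvFoldA, pvItemsA]
  -- names
  set L := pvPairs rs with hL
  set IA := (PySem.Set.ofList (L.map (·.1))).map (fun k => (k, pvSum k L)) with hIA
  set SA := PySem.List.sorted IA (fun kv => kv.1) false with hSA
  -- B's pair list is L
  have hLB : (rs.map (fun rec => ((PySem.Dict.mk rec).get? "round_id",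
        (PySem.Dict.mk rec).getD "total_tokens" 0))).filterMap
        (fun p => p.1.map (fun r => (r, p.2))) = L := by
    rw [List.filterMap_map]; rfl
  rw [hLB]
  -- strict key order of SA
  have hperm : SA.Perm IA := PySem.List.sorted_perm ..
  have hkeysIA : IA.map (·.1) = PySem.Set.ofList (L.map (·.1)) := by
    rw [hIA, List.map_map]
    exact (List.map_congr_left (fun k _ => rfl)).trans (List.map_id _)
  have hndSA : (SA.map (·.1)).Nodup := by
    refine ((hperm.map (·.1)).nodup_iff).mpr ?_
    rw [hkeysIA]; exact PySem.Set.nodup_ofList ..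
  have hstrictSA : SA.Pairwise (fun a b => a.1 < b.1) :=
    pvStrict SA (PySem.List.sorted_pairwise ..) hndSA
  -- membership characterization of SA
  have hmemSA : ∀ k v, (k, v) ∈ SA ↔ (k ∈ L.map (·.1) ∧ v = pvSum k L) := by
    intro k v
    rw [PySem.List.mem_sorted, hIA]
    constructor
    · intro h
      obtain ⟨x, hx, he⟩ := List.mem_map.mp h
      injection he with h1 h2
      subst h1; subst h2
      exact ⟨(PySem.Set.mem_ofList ..).mp hx, rfl⟩
    · rintro ⟨hk, rfl⟩
      exact List.mem_map.mpr ⟨k, (PySem.Set.mem_ofList ..).mpr hk, rfl⟩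
  -- the final dict(...) of A is the identity on SA
  have hofList : (PySem.Dict.ofList SA).items = SA := by
    have := PySem.Dict.items_foldl_insert_fresh SA (·.1) (·.2) PySem.Dict.empty
      (fun a _ => by simp) hndSA
    simpa using this
  rw [hofList]
  -- B side characterization
  set M := PySem.List.sorted L (fun kv => kv.1) false with hM
  have hMperm : M.Perm L := PySem.List.sorted_perm ..
  have hchar := pvGroupSums_char M (PySem.List.sorted_pairwise ..)
  have hmemGB : ∀ k v, (k, v) ∈ pvGroupSums M ↔ (k ∈ L.map (·.1) ∧ v = pvSum k L) := by
    intro k v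
    rw [hchar.2 k v, (hMperm.map (·.1)).mem_iff, pvSum_perm hMperm]
  -- uniqueness
  apply pvUniq SA (pvGroupSums M) ?_ hstrictSA hchar.1
  apply List.perm_of_nodup_nodup_toFinset_eq (pvNodup_of_strict _ hstrictSA)
    (pvNodup_of_strict _ hchar.1)
  ext ⟨k, v⟩
  simp only [List.mem_toFinset]
  rw [hmemSA k v, hmemGB k v]
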